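-- pv_equiv track=rewrite | github.com/FunctionPointerXDD/Part5 | test.py | password_generator
-- ===== SOURCE A (Python) =====
-- def password_generator(charset, length, start_index, end_index):
--     """Generate passwords from a specific range of the search space."""
--     total_combinations = len(charset) ** length
--     for i in range(start_index, end_index):
--         if i >= total_combinations:
--             break
--         # Convert the index to a password
--         password = []
--         n = i
--         for _ in range(length):
--             password.append(charset[n % len(charset)])
--             n //= len(charset)
--         yield ''.join(password)
-- ===== SOURCE B (Python) =====
-- def password_generator(charset, length, start_index, end_index):
--     """Generate passwords from a specific range of the search space."""
--     base = len(charset)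
--     limit = base ** length
--     i = start_index
--     if i >= end_index or i >= limit:
--         return
--     # digit odometer for the current index (least-significant digit first)
--     digits = []
--     n = i
--     for _ in range(length):
--         digits.append(n % base)
--         n //= base
--     while i < end_index and i < limit:
--         yield ''.join([charset[d] for d in digits])
--         i += 1
--         for j in range(len(digits)):
--             digits[j] += 1
--             if digits[j] < base:
--                 break
--             digits[j] = 0
-- ===== Notes on version B (the rewrite author's own statement) =====
-- stated objective: alternative
-- what changed: Instead of reconverting each index i to base-len(charset) digits from scratch, B converts start_index once and then advances a digit-array odometer (carry-propagating increment) across the range, with the loop bounds computed up front.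
import Mathlib
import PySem

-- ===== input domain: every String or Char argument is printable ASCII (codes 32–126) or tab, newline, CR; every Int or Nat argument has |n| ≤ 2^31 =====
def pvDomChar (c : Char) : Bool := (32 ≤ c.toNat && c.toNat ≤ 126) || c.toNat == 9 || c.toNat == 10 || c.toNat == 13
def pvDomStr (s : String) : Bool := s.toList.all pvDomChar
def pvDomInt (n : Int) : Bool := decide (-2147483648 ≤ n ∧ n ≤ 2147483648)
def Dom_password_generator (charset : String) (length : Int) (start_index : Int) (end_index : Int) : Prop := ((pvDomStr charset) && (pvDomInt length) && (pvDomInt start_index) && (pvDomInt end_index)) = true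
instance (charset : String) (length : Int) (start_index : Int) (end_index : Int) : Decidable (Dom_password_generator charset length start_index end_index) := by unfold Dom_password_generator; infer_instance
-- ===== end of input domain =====

-- B replaces A's per-index base conversion by a digit-array odometer advanced across the range (alternative decomposition, similar cost).


-- ===== PORT A =====
-- total_combinations = len(charset) ** length.  For length < 0 (and charset ≠ "", which Pre_ guarantees)
-- Python's value is a double: it rounds to 0.0 exactly when b^(-length) ≥ 2^1075 (the halfway point
-- below the smallest subnormal 2^-1074, ties-to-even), and otherwise lies in (0, 1].  Its only use is
-- the integer comparison `i >= total`, so we represent it by the Int 0 resp. 1, exact for that test.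
def pvUnderflow (b m : Nat) : Bool :=
  if b ≤ 1 then false
  else if 1075 ≤ m then true
  else decide (2 ^ 1075 ≤ b ^ m)

def pvTotalA (b : Nat) (length : Int) : Int :=
  if 0 ≤ length then (b : Int) ^ length.toNat
  else if pvUnderflow b (-length).toNat then 0 else 1

-- inner loop: for _ in range(length): password.append(charset[n % len]); n //= len
def pvPwA (cs : List Char) : Nat → Int → List Char
  | 0, _ => []
  | Nat.succ k, n =>
      ((PySem.List.pyGet? cs (PySem.Int.mod n (cs.length : Int))).getD ' ')
        :: pvPwA cs k (PySem.Int.floordiv n (cs.length : Int))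

-- outer loop `for i in range(start_index, end_index)` with the `i >= total_combinations` break;
-- the range is consumed lazily in Python, so the loop recurses on the current i instead of
-- materializing the range list (the break is checked before each element, exactly as in Python)
def pvGenA (cs : List Char) (total : Int) (L : Nat) (i e : Int) : List String :=
  if i < e then
    if total ≤ i then []
    else String.mk (pvPwA cs L i) :: pvGenA cs total L (i + 1) e
  else []
termination_by (e - i).toNat
decreasing_by omega

def password_generator (charset : String) (length : Int) (start_index : Int) (end_index : Int) : List String :=
  pvGenA charset.toList (pvTotalA charset.toList.length length) length.toNat start_index end_index

-- ===== PORT B =====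
-- limit = base ** length, used only in `i < limit`; the same exact Int representation (0 on double
-- underflow, else 1, for negative length) as explained above pvTotalA.
def pvLimitB (b : Nat) (length : Int) : Int :=
  if 0 ≤ length then (b : Int) ^ length.toNat
  else if pvUnderflow b (-length).toNat then 0 else 1

-- initial digits: for _ in range(length): digits.append(n % base); n //= base
def pvDigitsB (b : Nat) : Nat → Int → List Int
  | 0, _ => []
  | Nat.succ k, n => PySem.Int.mod n (b : Int) :: pvDigitsB b k (PySem.Int.floordiv n (b : Int))

-- odometer increment: digits[j] += 1; break if < base else set 0 and carry on
def pvIncrB (b : Nat) : List Int → List Int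
  | [] => []
  | d :: rest => if d + 1 < (b : Int) then (d + 1) :: rest else 0 :: pvIncrB b rest

-- ''.join([charset[d] for d in digits])
def pvJoinB (cs : List Char) (ds : List Int) : String :=
  String.mk (ds.map (fun d => (PySem.List.pyGet? cs d).getD ' '))

-- the while loop; since i only increases, `while i < end and i < limit` runs exactly
-- (min end limit - i).toNat times, which is the fuel
def pvGenB (cs : List Char) : List Int → Nat → List String
  | _, 0 => []
  | ds, Nat.succ k => pvJoinB cs ds :: pvGenB cs (pvIncrB cs.length ds) k

-- Python B's locals `base`/`limit` are inlined here as charset.toList.length / pvLimitB … .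
def password_generator_alt (charset : String) (length : Int) (start_index : Int) (end_index : Int) : List String :=
  if end_index ≤ start_index ∨ pvLimitB charset.toList.length length ≤ start_index then []
  else pvGenB charset.toList (pvDigitsB charset.toList.length length.toNat start_index)
    (min end_index (pvLimitB charset.toList.length length) - start_index).toNat

-- ===== PRECONDITION & SPEC =====
-- Pre_ excludes exactly the inputs where A raises ZeroDivisionError: empty charset with negative length
-- (0 ** negative), or empty charset with positive length and a negative index reached by the loop (n % 0).
def Pre_password_generator (charset : String) (length : Int) (start_index : Int) (end_index : Int) : Prop :=
  charset = "" → (0 ≤ length ∧ (length = 0 ∨ 0 ≤ start_index ∨ end_index ≤ start_index))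
instance (charset : String) (length : Int) (start_index : Int) (end_index : Int) : Decidable (Pre_password_generator charset length start_index end_index) := by unfold Pre_password_generator; infer_instance

def pvWitness_password_generator : String × Int × Int × Int := ("ab", 2, -1, 3)

def Spec_password_generator (charset : String) (length : Int) (start_index : Int) (end_index : Int) (out : List String) : Prop := out = password_generator_alt charset length start_index end_index
instance (charset : String) (length : Int) (start_index : Int) (end_index : Int) (out : List String) : Decidable (Spec_password_generator charset length start_index end_index out) := by unfold Spec_password_generator; infer_instance

-- ===== CLAIM (what is proved, stated in full; the proofs are below) =====
def Claim_equal_password_generator : Prop := ∀ (charset : String) (length : Int) (start_index : Int) (end_index : Int), Dom_password_generator charset length start_index end_index → Pre_password_generator charset length start_index end_index → Spec_password_generator charset length start_index end_index (password_generator charset length start_index end_index)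

-- ===== LEMMAS AND PROOFS =====

-- A's inner conversion produces exactly B's digits mapped through the charset
theorem pvPwA_eq_digits (cs : List Char) : ∀ (k : Nat) (n : Int),
    pvPwA cs k n = (pvDigitsB cs.length k n).map (fun d => (PySem.List.pyGet? cs d).getD ' ')
  | 0, _ => rfl
  | Nat.succ k, n => by
      simp [pvPwA, pvDigitsB, pvPwA_eq_digits cs k]

-- odometer increment = digits of n+1
theorem pvIncrB_digits (b : Nat) (hb : 0 < b) : ∀ (k : Nat) (n : Int),
    pvIncrB b (pvDigitsB b k n) = pvDigitsB b k (n + 1)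
  | 0, _ => rfl
  | Nat.succ k, n => by
      have hb' : (0 : Int) < (b : Int) := by exact_mod_cast hb
      have hm := PySem.Int.mod_eq_emod_of_pos (a := n) hb'
      have hd := PySem.Int.floordiv_eq_ediv_of_pos (a := n) hb'
      have h0 : 0 ≤ n % (b : Int) := Int.emod_nonneg n (by omega)
      have h1 : n % (b : Int) < (b : Int) := Int.emod_lt_of_pos n hb'
      have key : (b : Int) * (n / (b : Int)) + n % (b : Int) = n := Int.ediv_add_emod n (b : Int)
      simp only [pvDigitsB, pvIncrB, hm, hd]
      by_cases hc : n % (b : Int) + 1 < (b : Int)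
      · -- no carry: (n+1) % b = n % b + 1 and (n+1) / b = n / b
        have h' : (n + 1) / (b : Int) = n / (b : Int) ∧ (n + 1) % (b : Int) = n % (b : Int) + 1 :=
          (Int.ediv_emod_unique hb').mpr ⟨by linarith, by linarith, hc⟩
        rw [if_pos hc, PySem.Int.mod_eq_emod_of_pos hb', PySem.Int.floordiv_eq_ediv_of_pos hb',
          h'.1, h'.2]
      · -- carry: n % b = b - 1, so (n+1) % b = 0 and (n+1) / b = n / b + 1
        have hr : n % (b : Int) = (b : Int) - 1 := by linarith
        have h' : (n + 1) / (b : Int) = n / (b : Int) + 1 ∧ (n + 1) % (b : Int) = 0 :=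
          (Int.ediv_emod_unique hb').mpr ⟨by linear_combination key - hr, le_refl 0, hb'⟩
        rw [if_neg hc, PySem.Int.mod_eq_emod_of_pos hb', PySem.Int.floordiv_eq_ediv_of_pos hb',
          h'.1, h'.2, pvIncrB_digits b hb k (n / (b : Int))]

-- B's fuel loop enumerates the passwords of [i, i+c)
theorem pvGenB_eq (cs : List Char) (L : Nat) (h : 0 < cs.length ∨ L = 0) :
    ∀ (c : Nat) (i : Int),
      pvGenB cs (pvDigitsB cs.length L i) c
        = (PySem.List.pyRange i (i + c) 1).map (fun j => pvJoinB cs (pvDigitsB cs.length L j)) := by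
  intro c
  induction c with
  | zero =>
      intro i
      rw [show i + ((0 : Nat) : Int) = i by simp, PySem.List.pyRange_one_eq_nil le_rfl]
      rfl
  | succ k ih =>
      intro i
      have hstep : pvIncrB cs.length (pvDigitsB cs.length L i) = pvDigitsB cs.length L (i + 1) := by
        rcases h with hb | hL
        · exact pvIncrB_digits cs.length hb L i
        · subst hL; rfl
      have hcons : PySem.List.pyRange i (i + (Nat.succ k : Nat)) 1
          = i :: PySem.List.pyRange (i + 1) (i + (Nat.succ k : Nat)) 1 :=
        PySem.List.pyRange_one_cons (by push_cast; omega)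
      rw [hcons]
      simp only [List.map_cons, pvGenB, hstep]
      have := ih (i + 1)
      have harg : i + 1 + (k : Int) = i + ((Nat.succ k : Nat) : Int) := by push_cast; omega
      rw [harg] at this
      rw [this]

-- A's outer loop with break = the passwords of [s, min e total)
theorem pvGenA_eq (cs : List Char) (total : Int) (L : Nat) (s e : Int) :
    pvGenA cs total L s e
      = (PySem.List.pyRange s (min e total) 1).map (fun j => String.mk (pvPwA cs L j)) := by
  rw [pvGenA]
  by_cases hse : s < e
  · rw [if_pos hse]
    by_cases hbrk : total ≤ s
    · rw [if_pos hbrk, PySem.List.pyRange_one_eq_nil (show min e total ≤ s by omega)]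
      rfl
    · rw [if_neg hbrk, pvGenA_eq cs total L (s + 1) e,
        PySem.List.pyRange_one_cons (show s < min e total by omega)]
      rfl
  · rw [if_neg hse, PySem.List.pyRange_one_eq_nil (show min e total ≤ s by omega)]
    rfl
  termination_by (e - s).toNat
  decreasing_by omega

-- ===== VERDICT (by name: the statement is the Claim_ definition above) =====
theorem password_generator_spec : Claim_equal_password_generator := by
  intro charset length s e _hDom hPre
  unfold Spec_password_generator password_generator password_generator_alt
  have hlim : pvLimitB charset.toList.length length = pvTotalA charset.toList.length length := rfl
  rw [pvGenA_eq, hlim]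
  set cs := charset.toList with hcs
  set t := pvTotalA cs.length length with ht
  by_cases hguard : e ≤ s ∨ t ≤ s
  · rw [if_pos hguard, PySem.List.pyRange_one_eq_nil (show min e t ≤ s by omega)]
    rfl
  · rw [if_neg hguard]
    push_neg at hguard
    obtain ⟨hse, hst⟩ := hguard
    have hb : 0 < cs.length ∨ length.toNat = 0 := by
      by_cases hempty : charset = ""
      · obtain ⟨hl, hcase⟩ := hPre hempty
        rcases hcase with h0 | hs0 | hes
        · right; omega
        · -- charset empty and 0 ≤ s: were length.toNat > 0, t = 0 and s < t would force s < 0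
          by_cases hL : length.toNat = 0
          · right; exact hL
          · exfalso
            have hcl : cs.length = 0 := by simp [hcs, hempty]
            have : t = 0 := by
              rw [ht]; unfold pvTotalA
              rw [if_pos hl, hcl]
              simp [zero_pow hL]
            omega
        · omega
      · left
        have hnil : cs ≠ [] := by
          intro hnil
          apply hempty
          rw [hcs] at hnil
          cases charset
          simp_all
        exact List.length_pos_of_ne_nil hnil
    rw [pvGenB_eq cs length.toNat hb]
    have harg : s + ((min e t - s).toNat : Int) = min e t := by omega
    rw [harg]
    apply List.map_congr_left
    intro j _
    rw [pvJoinB, pvPwA_eq_digits]
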